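-- pv_equiv track=rewrite | github.com/MauroB3/quixo | heuristic2.py | value_of_list
-- ===== SOURCE A (Python) =====
-- def value_of_list(list, player):
--     score = 0
--     best_score = 0
--     for pos in range(5):
--         if list[pos] == player:
--             score += 1
--             best_score = max(best_score, score)
--         else:
--             score = 0
--     return best_score
-- ===== SOURCE B (Python) =====
-- from itertools import groupby
--
-- def value_of_list(list, player):
--     vals = [list[i] for i in range(5)]
--     return max((sum(1 for _ in g) for k, g in groupby(vals) if k == player), default=0)
-- ===== Notes on version B (the rewrite author's own statement) =====
-- stated objective: idiomatic
-- what changed: Replaces the online running-counter/best-score loop with a partition-into-maximal-runs (itertools.groupby) followed by a max over run lengths of the player's runs.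
import Mathlib
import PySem

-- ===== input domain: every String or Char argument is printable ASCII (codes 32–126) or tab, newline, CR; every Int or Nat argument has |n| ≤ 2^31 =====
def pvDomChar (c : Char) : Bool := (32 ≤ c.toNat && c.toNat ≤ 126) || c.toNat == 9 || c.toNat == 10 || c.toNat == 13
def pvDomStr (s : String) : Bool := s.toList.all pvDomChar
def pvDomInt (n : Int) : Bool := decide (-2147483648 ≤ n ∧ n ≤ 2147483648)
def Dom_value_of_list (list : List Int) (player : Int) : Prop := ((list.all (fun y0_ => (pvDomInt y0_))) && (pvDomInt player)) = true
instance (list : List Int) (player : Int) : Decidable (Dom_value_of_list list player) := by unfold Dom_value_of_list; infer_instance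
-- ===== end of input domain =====

-- B replaces A's online running-counter/best-score accumulator by partition-into-maximal-runs (itertools.groupby) then max of the player's run lengths.

-- ===== PORT A =====
-- A's loop 'for pos in range(5)' over state (score, best_score); list[pos] via pyGet? (none = IndexError, excluded by Pre_).
def value_of_list (list : List Int) (player : Int) : Int :=
  ((PySem.List.pyRange 0 5 1).foldl
    (fun (st : Int × Int) pos =>
      if PySem.List.pyGet? list pos = some player then
        (st.1 + 1, max st.2 (st.1 + 1))
      else
        (0, st.2))
    (0, 0)).2

-- ===== PORT B =====
-- itertools.groupby(vals): maximal runs of equal adjacent values, in order, as (value, length) pairs.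
def pvGroupby (xs : List Int) : List (Int × Int) :=
  (xs.foldl
    (fun (acc : List (Int × Int)) x =>
      match acc with
      | [] => [(x, 1)]
      | (y, n) :: rest => if x = y then (y, n + 1) :: rest else (x, 1) :: (y, n) :: rest)
    []).reverse

def value_of_list_alt (list : List Int) (player : Int) : Int :=
  let vals := (PySem.List.pyRange 0 5 1).map (fun i => (PySem.List.pyGet? list i).getD 0)
  ((pvGroupby vals).filterMap (fun kn => if kn.1 = player then some kn.2 else none)).foldl max 0

-- ===== PRECONDITION & SPEC =====
-- Pre_ excludes lists shorter than 5, on which A raises IndexError (list[pos] for pos in range(5)).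
def Pre_value_of_list (list : List Int) (player : Int) : Prop := 5 ≤ list.length
instance (list : List Int) (player : Int) : Decidable (Pre_value_of_list list player) := by unfold Pre_value_of_list; infer_instance
def pvWitness_value_of_list : List Int × Int := ([1, 1, 0, 1, 1], 1)

def Spec_value_of_list (list : List Int) (player : Int) (out : Int) : Prop := out = value_of_list_alt list player
instance (list : List Int) (player : Int) (out : Int) : Decidable (Spec_value_of_list list player out) := by unfold Spec_value_of_list; infer_instance

-- ===== CLAIM (what is proved, stated in full; the proofs are below) =====
def Claim_equal_value_of_list : Prop := ∀ (list : List Int) (player : Int), Dom_value_of_list list player → Pre_value_of_list list player → Spec_value_of_list list player (value_of_list list player)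

-- ===== LEMMAS AND PROOFS =====

-- A's loop body and groupby's accumulator step, named for the proofs (defeq to the ports' lambdas).
def pvStepA (player : Int) (st : Int × Int) (x : Int) : Int × Int :=
  if x = player then (st.1 + 1, max st.2 (st.1 + 1)) else (0, st.2)

def pvStepG (acc : List (Int × Int)) (x : Int) : List (Int × Int) :=
  match acc with
  | [] => [(x, 1)]
  | (y, n) :: rest => if x = y then (y, n + 1) :: rest else (x, 1) :: (y, n) :: rest

-- max over the player's run lengths of a run list (head = most recent run), base 0.
def pvMP (player : Int) (l : List (Int × Int)) : Int :=
  l.foldr (fun kn m => if kn.1 = player then max kn.2 m else m) 0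

-- current-run score read off the accumulator head
def pvHd (player : Int) (acc : List (Int × Int)) : Int :=
  match acc with
  | [] => 0
  | (y, n) :: _ => if y = player then n else 0

theorem pvMP_nonneg (player : Int) (l : List (Int × Int)) : 0 ≤ pvMP player l := by
  induction l with
  | nil => simp [pvMP]
  | cons kn l ih =>
    simp only [pvMP, List.foldr_cons] at *
    split_ifs <;> omega

-- invariant of A's fold against groupby's fold
theorem pvKey (player : Int) (xs : List Int) :
    ∀ (acc : List (Int × Int)) (score best : Int),
      score = pvHd player acc → best = pvMP player acc →
      (xs.foldl (pvStepA player) (score, best)).2 = pvMP player (xs.foldl pvStepG acc) := by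
  induction xs with
  | nil => intro acc score best _ hb; simpa using hb
  | cons x xs ih =>
    intro acc score best hs hb
    simp only [List.foldl_cons]
    by_cases hx : x = player
    · rw [show pvStepA player (score, best) x = (score + 1, max best (score + 1)) from by
        simp [pvStepA, hx]]
      match acc with
      | [] =>
        rw [show pvStepG [] x = [(x, 1)] from rfl]
        simp only [pvHd, pvMP, List.foldr_nil] at hs hb
        apply ih
        · simp [pvHd, hx]; omega
        · simp [pvMP, hx]; omega
      | (y, n) :: rest =>
        by_cases hy : x = y
        · rw [show pvStepG ((y, n) :: rest) x = (y, n + 1) :: rest from by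
            simp [pvStepG, hy]]
          rw [hx] at hy
          simp [pvHd, pvMP, ← hy] at hs hb
          apply ih
          · simp [pvHd, ← hy]; omega
          · simp [pvMP, ← hy]; omega
        · rw [show pvStepG ((y, n) :: rest) x = (x, 1) :: (y, n) :: rest from by
            simp [pvStepG, hy]]
          have hyp : y ≠ player := fun h => hy (hx.trans h.symm)
          simp only [pvHd, pvMP, List.foldr_cons, if_neg hyp] at hs hb
          apply ih
          · simp [pvHd, hx]; omega
          · simp [pvMP, hx, hyp]; omega
    · rw [show pvStepA player (score, best) x = (0, best) from by simp [pvStepA, hx]]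
      match acc with
      | [] =>
        rw [show pvStepG [] x = [(x, 1)] from rfl]
        apply ih
        · simp [pvHd, hx]
        · simpa [pvMP, hx] using hb
      | (y, n) :: rest =>
        by_cases hy : x = y
        · rw [show pvStepG ((y, n) :: rest) x = (y, n + 1) :: rest from by
            simp [pvStepG, hy]]
          have hyp : y ≠ player := fun h => hx (hy.trans h)
          simp only [pvMP, List.foldr_cons, if_neg hyp] at hb
          apply ih
          · simp [pvHd, hyp]
          · simpa [pvMP, hyp] using hb
        · rw [show pvStepG ((y, n) :: rest) x = (x, 1) :: (y, n) :: rest from by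
            simp [pvStepG, hy]]
          apply ih
          · simp [pvHd, hx]
          · simpa [pvMP, hx] using hb

-- B's max-over-reversed-runs equals pvMP
theorem pvRevMax (player : Int) (l : List (Int × Int)) :
    ∀ a : Int, 0 ≤ a →
      ((l.reverse.filterMap (fun kn => if kn.1 = player then some kn.2 else none)).foldl max a)
        = max a (pvMP player l) := by
  induction l with
  | nil => intro a ha; simp [pvMP]; omega
  | cons kn l ih =>
    intro a ha
    obtain ⟨y, n⟩ := kn
    simp only [List.reverse_cons, List.filterMap_append, List.foldl_append, pvMP,
      List.foldr_cons, List.filterMap_cons, List.filterMap_nil]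
    by_cases hy : y = player
    · simp only [hy]
      simp
      simp only [List.filterMap_reverse, List.foldl_reverse] at ih
      rw [ih a ha]
      have := pvMP_nonneg player l
      simp only [pvMP] at *
      omega
    · simp only [if_neg hy, List.foldl_nil]
      rw [ih a ha]
      simp [pvMP]

theorem value_of_list_eq_alt (a b c d e : Int) (rest : List Int) (player : Int) :
    value_of_list (a :: b :: c :: d :: e :: rest) player =
      value_of_list_alt (a :: b :: c :: d :: e :: rest) player := by
  have hr : PySem.List.pyRange 0 5 1 = [0, 1, 2, 3, 4] := by decide
  have h0 : PySem.List.pyGet? (a :: b :: c :: d :: e :: rest) 0 = some a := by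
    simp [PySem.List.pyGet?, PySem.List.pyIdx?]
    rw [if_pos (by omega)]
    simp
  have h1 : PySem.List.pyGet? (a :: b :: c :: d :: e :: rest) 1 = some b := by
    simp [PySem.List.pyGet?, PySem.List.pyIdx?]
    rw [if_pos (by omega)]
    simp
  have h2 : PySem.List.pyGet? (a :: b :: c :: d :: e :: rest) 2 = some c := by
    simp [PySem.List.pyGet?, PySem.List.pyIdx?]
    rw [if_pos (by omega)]
    simp
  have h3 : PySem.List.pyGet? (a :: b :: c :: d :: e :: rest) 3 = some d := by
    simp [PySem.List.pyGet?, PySem.List.pyIdx?]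
    rw [if_pos (by omega)]
    simp
  have h4 : PySem.List.pyGet? (a :: b :: c :: d :: e :: rest) 4 = some e := by
    simp [PySem.List.pyGet?, PySem.List.pyIdx?]
    rw [if_pos (by omega)]
    simp
  have hA : value_of_list (a :: b :: c :: d :: e :: rest) player =
      ([a, b, c, d, e].foldl (pvStepA player) (0, 0)).2 := by
    simp only [value_of_list, hr, List.foldl_cons, List.foldl_nil, h0, h1, h2, h3, h4,
      Option.some.injEq, pvStepA]
  have hB : value_of_list_alt (a :: b :: c :: d :: e :: rest) player =
      ((( [a, b, c, d, e].foldl pvStepG []).reverse.filterMap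
        (fun kn => if kn.1 = player then some kn.2 else none)).foldl max 0) := by
    simp only [value_of_list_alt, pvGroupby, hr, List.map_cons, List.map_nil,
      h0, h1, h2, h3, h4, Option.getD_some]
    rfl
  rw [hA, hB, pvRevMax player _ 0 le_rfl,
    pvKey player [a, b, c, d, e] [] 0 0 rfl rfl]
  have := pvMP_nonneg player ([a, b, c, d, e].foldl pvStepG [])
  omega

-- ===== VERDICT (by name: the statement is the Claim_ definition above) =====
theorem value_of_list_spec : Claim_equal_value_of_list := by
  intro list player _ hpre
  unfold Spec_value_of_list
  match list, hpre with
  | a :: b :: c :: d :: e :: rest, _ =>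
    exact value_of_list_eq_alt a b c d e rest player
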